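-- pv_equiv track=rewrite | github.com/SeungminKimdev/study-code | 프로그래머스/2/42626. 더 맵게/더 맵게.py | solution
-- ===== SOURCE A (Python) =====
-- import heapq
--
-- def solution(scoville, K):
--     hq = scoville
--     heapq.heapify(hq)
--     answer = 0
--     while hq[0] < K:
--         if len(hq) < 2:
--             answer = -1
--             break
--         mix_food = heapq.heappop(hq)
--         mix_food += heapq.heappop(hq) * 2
--         heapq.heappush(hq, mix_food)
--         answer += 1
--     return answer
-- ===== SOURCE B (Python) =====
-- def solution(scoville, K):
--     # Heap-free version: linear scans with min()/remove() on a plain list.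
--     # (A heapifies its argument in place; B leaves the caller's list untouched.)
--     pot = list(scoville)
--     count = 0
--     while min(pot) < K:
--         if len(pot) < 2:
--             return -1
--         a = min(pot)
--         pot.remove(a)
--         b = min(pot)
--         pot.remove(b)
--         pot.append(a + 2 * b)
--         count += 1
--     return count
-- ===== Notes on version B (the rewrite author's own statement) =====
-- stated objective: simpler
-- what changed: Replaced the heapq binary heap with direct linear scans on a plain list (min/remove/append), dropping the heap structure entirely; Pre_ excludes only the empty list, on which A raises IndexError (and B raises ValueError).
import Mathlib
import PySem

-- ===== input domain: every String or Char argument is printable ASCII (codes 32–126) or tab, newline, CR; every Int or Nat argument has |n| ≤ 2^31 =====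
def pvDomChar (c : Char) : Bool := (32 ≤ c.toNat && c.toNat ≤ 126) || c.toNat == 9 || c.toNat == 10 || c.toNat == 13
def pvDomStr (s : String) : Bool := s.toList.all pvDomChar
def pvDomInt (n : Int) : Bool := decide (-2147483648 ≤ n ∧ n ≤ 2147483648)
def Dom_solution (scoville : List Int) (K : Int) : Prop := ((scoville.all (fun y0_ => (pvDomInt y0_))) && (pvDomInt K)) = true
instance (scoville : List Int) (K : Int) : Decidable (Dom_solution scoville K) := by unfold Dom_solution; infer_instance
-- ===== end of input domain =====

-- B replaces A's heapq binary heap by direct linear scans (min/remove/append) on a plain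
-- list: simpler, no heap structure.  A mutates its argument in place (heapify); B copies it
-- first — the equivalence proved here is about the return value.

-- ===== PORT A =====
-- CPython heapq._siftdown: newitem = heap[pos]; while pos > startpos: parent = (pos-1)>>1;
-- if newitem < heap[parent]: heap[pos] = heap[parent]; pos = parent else break; heap[pos] = newitem.
-- (_siftup writes heap[pos] = newitem just before calling _siftdown; since this loop never
-- reads index pos and every exit path overwrites it, folding that write into the final
-- `set` yields the identical array.)
def hqSdLoop (fuel : Nat) (l : List Int) (newitem : Int) (startpos pos : Nat) : List Int :=
  match fuel with
  | 0 => l.set pos newitem          -- fuel ≥ pos suffices: here pos = 0, the loop's stop case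
  | fuel + 1 =>
    if startpos < pos then
      if newitem < l.getD ((pos - 1) / 2) 0 then
        hqSdLoop fuel (l.set pos (l.getD ((pos - 1) / 2) 0)) newitem startpos ((pos - 1) / 2)
      else l.set pos newitem
    else l.set pos newitem

-- CPython heapq._siftup: bubble the hole at pos down to a leaf along the smaller child
-- (childpos = 2*pos+1; move to rightpos iff rightpos < len and not heap[childpos] < heap[rightpos]),
-- then place newitem and _siftdown(heap, startpos, pos).  fuel ≥ len - pos suffices.
def hqSuLoop (fuel : Nat) (l : List Int) (newitem : Int) (startpos pos : Nat) : List Int :=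
  match fuel with
  | 0 => hqSdLoop pos l newitem startpos pos
  | fuel + 1 =>
    if 2 * pos + 1 < l.length then
      if 2 * pos + 2 < l.length ∧ ¬ (l.getD (2 * pos + 1) 0 < l.getD (2 * pos + 2) 0) then
        hqSuLoop fuel (l.set pos (l.getD (2 * pos + 2) 0)) newitem startpos (2 * pos + 2)
      else
        hqSuLoop fuel (l.set pos (l.getD (2 * pos + 1) 0)) newitem startpos (2 * pos + 1)
    else hqSdLoop pos l newitem startpos pos

def hqSiftup (l : List Int) (pos : Nat) : List Int := hqSuLoop l.length l (l.getD pos 0) pos pos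

-- heapq.heapify: for i in reversed(range(n // 2)): _siftup(heap, i)
def hqHeapify (l : List Int) : List Int :=
  ((List.range (l.length / 2)).reverse).foldl (fun a i => hqSiftup a i) l

-- heapq.heappop: lastelt = heap.pop(); if heap: ret = heap[0]; heap[0] = lastelt;
-- _siftup(heap, 0); return ret else return lastelt.  ([] raises IndexError: outside Pre_.)
def hqHeappop (l : List Int) : Int × List Int :=
  if l.dropLast.isEmpty then (l.getLastD 0, l.dropLast)
  else (l.dropLast.getD 0 0, hqSiftup ((l.dropLast).set 0 (l.getLastD 0)) 0)

-- heapq.heappush: heap.append(item); _siftdown(heap, 0, len(heap)-1)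
def hqHeappush (l : List Int) (x : Int) : List Int := hqSdLoop l.length (l ++ [x]) x 0 l.length

-- while hq[0] < K: if len < 2: answer = -1; break; pop, pop, push; answer += 1
-- (each iteration shrinks hq by one element, so fuel = len(hq) suffices)
def hqLoop (fuel : Nat) (K : Int) (hq : List Int) (answer : Int) : Int :=
  match fuel with
  | 0 => answer
  | fuel + 1 =>
    if hq.getD 0 0 < K then
      if hq.length < 2 then -1
      else
        hqLoop fuel K (hqHeappush (hqHeappop (hqHeappop hq).2).2
                  ((hqHeappop hq).1 + (hqHeappop (hqHeappop hq).2).1 * 2)) (answer + 1)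
    else answer

def solution (scoville : List Int) (K : Int) : Int :=
  hqLoop (hqHeapify scoville).length K (hqHeapify scoville) 0

-- ===== PORT B =====
-- while min(pot) < K: if len(pot) < 2: return -1; a = min(pot), remove; b = min(pot),
-- remove; append a + 2*b; count += 1.  (min([]) raises ValueError — outside Pre_; remove
-- of a value min() just returned cannot fail, so the remove-none branches are unreachable;
-- each iteration shrinks pot by one element, so fuel = len(pot) suffices)
def altLoop (fuel : Nat) (K : Int) (pot : List Int) (count : Int) : Int :=
  match fuel with
  | 0 => count
  | fuel + 1 =>
    match PySem.List.min? pot (fun x => x) with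
    | none => count
    | some a =>
      if a < K then
        if pot.length < 2 then -1
        else
          match PySem.List.remove? pot a with
          | none => count
          | some pot1 =>
            match PySem.List.min? pot1 (fun x => x) with
            | none => count
            | some b =>
              match PySem.List.remove? pot1 b with
              | none => count
              | some pot2 => altLoop fuel K (pot2 ++ [a + 2 * b]) (count + 1)
      else count

def solution_alt (scoville : List Int) (K : Int) : Int :=
  altLoop scoville.length K scoville 0

-- ===== PRECONDITION & SPEC =====
-- Pre_ excludes only the empty list, on which A raises IndexError (hq[0]).
def Pre_solution (scoville : List Int) (K : Int) : Prop := scoville ≠ []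
instance (scoville : List Int) (K : Int) : Decidable (Pre_solution scoville K) := by
  unfold Pre_solution; infer_instance
def pvWitness_solution : List Int × Int := ([1, 2, 3, 9, 10, 12], 7)

def Spec_solution (scoville : List Int) (K : Int) (out : Int) : Prop := out = solution_alt scoville K
instance (scoville : List Int) (K : Int) (out : Int) : Decidable (Spec_solution scoville K out) := by
  unfold Spec_solution; infer_instance

-- ===== CLAIM (what is proved, stated in full; the proofs are below) =====
def Claim_equal_solution : Prop := ∀ (scoville : List Int) (K : Int), Dom_solution scoville K → Pre_solution scoville K → Spec_solution scoville K (solution scoville K)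

-- ===== LEMMAS AND PROOFS =====

-- length bookkeeping for the heap operations
theorem hqSdLoop_length (newitem : Int) (startpos : Nat) : ∀ (fuel pos : Nat) (l : List Int),
    (hqSdLoop fuel l newitem startpos pos).length = l.length := by
  intro fuel
  induction fuel with
  | zero => intro pos l; simp [hqSdLoop]
  | succ fuel ih =>
    intro pos l
    rw [hqSdLoop]
    split
    · split
      · rw [ih]; simp
      · simp
    · simp

theorem hqSuLoop_length (newitem : Int) (startpos : Nat) : ∀ (fuel pos : Nat) (l : List Int),
    (hqSuLoop fuel l newitem startpos pos).length = l.length := by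
  intro fuel
  induction fuel with
  | zero => intro pos l; rw [hqSuLoop, hqSdLoop_length]
  | succ fuel ih =>
    intro pos l
    rw [hqSuLoop]
    split
    · split
      · rw [ih]; simp
      · rw [ih]; simp
    · rw [hqSdLoop_length]

theorem hqHeappop_length (l : List Int) (h : 1 ≤ l.length) :
    (hqHeappop l).2.length + 1 = l.length := by
  unfold hqHeappop hqSiftup
  by_cases he : l.dropLast.isEmpty <;>
    simp [he, hqSuLoop_length, List.length_dropLast] at * <;> omega

theorem hqHeappush_length (l : List Int) (x : Int) :
    (hqHeappush l x).length = l.length + 1 := by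
  simp [hqHeappush, hqSdLoop_length]

-- getD/set bookkeeping
theorem getD_set_ne (l : List Int) (i j : Nat) (x : Int) (h : i ≠ j) :
    (l.set i x).getD j 0 = l.getD j 0 := by
  simp [List.getD_eq_getElem?_getD, List.getElem?_set_ne h]

theorem getD_set_eq (l : List Int) (i : Nat) (x : Int) (h : i < l.length) :
    (l.set i x).getD i 0 = x := by
  simp [List.getD_eq_getElem?_getD, h]

theorem set_getD_self (l : List Int) (i : Nat) (h : i < l.length) :
    l.set i (l.getD i 0) = l := by
  simp [List.getD_eq_getElem, h, List.set_getElem_self]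

theorem getD_dropLast (l : List Int) (i : Nat) (h : i < l.length - 1) :
    l.dropLast.getD i 0 = l.getD i 0 := by
  simp only [List.getD_eq_getElem?_getD, List.getElem?_dropLast, h, if_pos]

theorem getD_append_left (l : List Int) (t : List Int) (i : Nat) (h : i < l.length) :
    (l ++ t).getD i 0 = l.getD i 0 := by
  simp [List.getD_eq_getElem?_getD, List.getElem?_append_left h]

-- multiset bookkeeping for the sift loops
theorem getD_cons_set_perm : ∀ (t : List Int) (m : Nat) (x : Int), m < t.length →
    ((t.getD m 0) :: t.set m x).Perm (x :: t) := by
  intro t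
  induction t with
  | nil => intro m x h; simp at h
  | cons b u ih =>
    intro m x h
    cases m with
    | zero => simpa using List.Perm.swap x b u
    | succ m =>
      have hm : m < u.length := by simpa using h
      have h1 : ((b :: u).set (m+1) x) = b :: u.set m x := by simp
      rw [h1]
      exact ((List.Perm.swap b (u.getD m 0) (u.set m x)).trans
        ((ih m x hm).cons b)).trans (List.Perm.swap x b u)

theorem set_set_perm (l : List Int) (i j : Nat) (x : Int) (hij : i ≠ j)
    (hi : i < l.length) (hj : j < l.length) :
    ((l.set i (l.getD j 0)).set j x).Perm (l.set i x) := by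
  induction l generalizing i j with
  | nil => simp at hi
  | cons x' t ih =>
    cases i with
    | zero =>
      cases j with
      | zero => omega
      | succ m =>
        have hm : m < t.length := by simpa using hj
        simpa using getD_cons_set_perm t m x hm
    | succ n =>
      cases j with
      | zero =>
        have hn : n < t.length := by simpa using hi
        have h1 := getD_cons_set_perm (t.set n x') n x (by simpa using hn)
        rw [getD_set_eq t n x' hn, List.set_set] at h1
        simpa using h1.symm
      | succ m =>
        have hn : n < t.length := by simpa using hi
        have hm : m < t.length := by simpa using hj
        simpa using (ih n m (by omega) hn hm).cons x'

theorem sdLoop_perm (newitem : Int) (startpos : Nat) : ∀ (fuel pos : Nat) (l : List Int),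
    pos < l.length → (hqSdLoop fuel l newitem startpos pos).Perm (l.set pos newitem) := by
  intro fuel
  induction fuel with
  | zero => intro pos l _; rw [hqSdLoop]
  | succ fuel ih =>
    intro pos l hl
    rw [hqSdLoop]
    split
    · split
      · have h1 := ih ((pos - 1) / 2) (l.set pos (l.getD ((pos - 1) / 2) 0))
          (by simpa using by omega)
        exact h1.trans (set_set_perm l pos ((pos - 1) / 2) newitem (by omega) hl (by omega))
      · exact List.Perm.refl _
    · exact List.Perm.refl _

theorem suLoop_perm (newitem : Int) (startpos : Nat) : ∀ (fuel pos : Nat) (l : List Int),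
    pos < l.length →
    (hqSuLoop fuel l newitem startpos pos).Perm (l.set pos newitem) := by
  intro fuel
  induction fuel with
  | zero => intro pos l hl; rw [hqSuLoop]; exact sdLoop_perm newitem startpos pos pos l hl
  | succ fuel ih =>
    intro pos l hl
    rw [hqSuLoop]
    split
    · next h =>
      split
      · next hc =>
        have h1 := ih (2*pos+2) (l.set pos (l.getD (2*pos+2) 0)) (by simpa using hc.1)
        exact h1.trans (set_set_perm l pos (2*pos+2) newitem (by omega) hl hc.1)
      · have h1 := ih (2*pos+1) (l.set pos (l.getD (2*pos+1) 0)) (by simpa using h)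
        exact h1.trans (set_set_perm l pos (2*pos+1) newitem (by omega) hl h)
    · exact sdLoop_perm newitem startpos pos pos l hl

theorem siftup_perm (l : List Int) (pos : Nat) (h : pos < l.length) :
    (hqSiftup l pos).Perm l := by
  have := suLoop_perm (l.getD pos 0) pos l.length pos l h
  rwa [set_getD_self l pos h] at this

-- the heap order predicate, Python parent index (j-1)/2, from level k down
def HeapFrom (l : List Int) (k : Nat) : Prop :=
  ∀ j, 0 < j → j < l.length → k ≤ (j - 1) / 2 → l.getD ((j - 1) / 2) 0 ≤ l.getD j 0

def IsHeap (l : List Int) : Prop := HeapFrom l 0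

-- pos lies in the subtree rooted at s
def InSub (s pos : Nat) : Prop :=
  if s < pos then InSub s ((pos - 1) / 2) else pos = s
termination_by pos
decreasing_by omega

theorem insub_ge {s pos : Nat} (h : InSub s pos) : s ≤ pos := by
  rw [InSub] at h
  split at h
  · omega
  · omega

theorem insub_par {s pos : Nat} (h : InSub s pos) (hl : s < pos) : InSub s ((pos - 1) / 2) := by
  rw [InSub] at h; simpa [hl] using h

theorem insub_child {s pos j : Nat} (h : InSub s pos) (hj : (j - 1) / 2 = pos) (hj0 : s < j) :
    InSub s j := by
  rw [InSub]
  simp [hj0, hj, h]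

theorem insub_zero (pos : Nat) : InSub 0 pos := by
  induction pos using Nat.strong_induction_on with
  | _ pos ih =>
    rw [InSub]
    split
    · exact ih _ (by omega)
    · omega

-- the sift-down (bubble-up) loop turns its invariant into HeapFrom s
theorem sd_heapfrom (newitem : Int) (s : Nat) : ∀ (fuel pos : Nat) (l : List Int),
    pos ≤ fuel → pos < l.length → InSub s pos →
    (∀ j, 0 < j → j < l.length → s ≤ (j-1)/2 → j ≠ pos → (j-1)/2 ≠ pos →
        l.getD ((j-1)/2) 0 ≤ l.getD j 0) →
    (∀ j, 0 < j → j < l.length → (j-1)/2 = pos →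
        newitem ≤ l.getD j 0 ∧ (s < pos → l.getD ((pos-1)/2) 0 ≤ l.getD j 0)) →
    HeapFrom (hqSdLoop fuel l newitem s pos) s := by
  intro fuel
  induction fuel with
  | zero =>
    intro pos l hf hl hins hSA hSB
    have hpos : pos = 0 := by omega
    have hps : pos = s := by
      subst hpos
      rw [InSub] at hins; simpa using hins
    rw [hqSdLoop]
    intro j hj0 hjl hks
    simp only [List.length_set] at hjl
    by_cases hjp : j = pos
    · omega
    · by_cases hpj : (j-1)/2 = pos
      · rw [hpj, getD_set_eq l pos newitem hl, getD_set_ne l pos j newitem (by omega)]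
        exact (hSB j hj0 hjl hpj).1
      · rw [getD_set_ne l pos ((j-1)/2) newitem (by omega),
            getD_set_ne l pos j newitem (by omega)]
        exact hSA j hj0 hjl hks hjp hpj
  | succ fuel ih =>
    intro pos l hf hl hins hSA hSB
    rw [hqSdLoop]
    split
    · next hs =>
      split
      · next hlt =>
        -- the hole moves up to the parent
        refine ih ((pos-1)/2) _ (by omega) (by simp; omega) (insub_par hins hs) ?_ ?_
        · -- SA for the new state
          intro j hj0 hjl hks hne hpne
          simp only [List.length_set] at hjl
          by_cases hjp : j = pos
          · subst hjp; exact absurd rfl hpne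
          · by_cases hpj : (j-1)/2 = pos
            · rw [hpj, getD_set_eq l pos _ hl, getD_set_ne l pos j _ (by omega)]
              exact (hSB j hj0 hjl hpj).2 hs
            · rw [getD_set_ne l pos ((j-1)/2) _ (by omega), getD_set_ne l pos j _ (by omega)]
              exact hSA j hj0 hjl hks hjp hpj
        · -- SB for the new state
          intro j hj0 hjl hpj
          simp only [List.length_set] at hjl
          have hspar : s ≤ (pos-1)/2 := insub_ge (insub_par hins hs)
          have hparpar : ∀ _ : s < (pos-1)/2,
              l.getD (((pos-1)/2 - 1)/2) 0 ≤ l.getD ((pos-1)/2) 0 := by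
            intro hsp
            exact hSA ((pos-1)/2) (by omega) (by omega)
              (insub_ge (insub_par (insub_par hins hs) hsp)) (by omega) (by omega)
          by_cases hjp : j = pos
          · rw [hjp, getD_set_eq l pos _ hl]
            refine ⟨le_of_lt hlt, fun hsp => ?_⟩
            rw [getD_set_ne l pos (((pos-1)/2 - 1)/2) _ (by omega)]
            exact hparpar hsp
          · rw [getD_set_ne l pos j _ (by omega)]
            have hj : l.getD ((pos-1)/2) 0 ≤ l.getD j 0 := by
              have := hSA j hj0 hjl (by omega) hjp (by omega)
              rwa [hpj] at this
            refine ⟨le_trans (le_of_lt hlt) hj, fun hsp => ?_⟩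
            rw [getD_set_ne l pos (((pos-1)/2 - 1)/2) _ (by omega)]
            exact le_trans (hparpar hsp) hj
      · next hge =>
        -- stop: parent small enough; place newitem at pos
        intro j hj0 hjl hks
        simp only [List.length_set] at hjl
        by_cases hjp : j = pos
        · rw [hjp, getD_set_eq l pos newitem hl, getD_set_ne l pos _ newitem (by omega)]
          omega
        · by_cases hpj : (j-1)/2 = pos
          · rw [hpj, getD_set_eq l pos newitem hl, getD_set_ne l pos j newitem (by omega)]
            exact (hSB j hj0 hjl hpj).1
          · rw [getD_set_ne l pos ((j-1)/2) newitem (by omega),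
                getD_set_ne l pos j newitem (by omega)]
            exact hSA j hj0 hjl hks hjp hpj
    · next hns =>
      -- pos = s: place newitem at pos
      have hps : pos = s := by
        rw [InSub] at hins; simpa [hns] using hins
      subst hps
      intro j hj0 hjl hks
      simp only [List.length_set] at hjl
      by_cases hjp : j = pos
      · omega
      · by_cases hpj : (j-1)/2 = pos
        · rw [hpj, getD_set_eq l pos newitem hl, getD_set_ne l pos j newitem (by omega)]
          exact (hSB j hj0 hjl hpj).1
        · rw [getD_set_ne l pos ((j-1)/2) newitem (by omega),
              getD_set_ne l pos j newitem (by omega)]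
          exact hSA j hj0 hjl hks hjp hpj

-- the sift-up (bubble-down) loop
theorem su_heapfrom (newitem : Int) (s : Nat) : ∀ (fuel pos : Nat) (l : List Int),
    l.length - pos ≤ fuel → pos < l.length → InSub s pos →
    (∀ j, 0 < j → j < l.length → s ≤ (j-1)/2 → j ≠ pos → (j-1)/2 ≠ pos →
        l.getD ((j-1)/2) 0 ≤ l.getD j 0) →
    (s < pos → ∀ j, 0 < j → j < l.length → (j-1)/2 = pos →
        l.getD ((pos-1)/2) 0 ≤ l.getD j 0) →
    HeapFrom (hqSuLoop fuel l newitem s pos) s := by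
  intro fuel
  induction fuel with
  | zero =>
    intro pos l hf hl hins hSA hA2
    omega
  | succ fuel ih =>
    intro pos l hf hl hins hSA hA2
    rw [hqSuLoop]
    split
    · next hch =>
      split
      · next hc =>
        -- descend to the right child c = 2*pos+2
        have hcl : 2*pos+2 < l.length := hc.1
        have hmin : ∀ j, 0 < j → j < l.length → (j-1)/2 = pos →
            l.getD (2*pos+2) 0 ≤ l.getD j 0 := by
          intro j hj0 hjl hpj
          have hj : j = 2*pos+1 ∨ j = 2*pos+2 := by omega
          have h2 := hc.2
          rcases hj with h | h
          · rw [h]; omega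
          · rw [h]
        refine ih (2*pos+2) _ (by simp; omega) (by simp; omega)
          (insub_child hins (by omega) (by have := insub_ge hins; omega)) ?_ ?_
        · intro j hj0 hjl hks hjc hpjc
          simp only [List.length_set] at hjl
          by_cases hjp : j = pos
          · rw [hjp] at hks ⊢
            rw [getD_set_ne l pos ((pos-1)/2) _ (by omega), getD_set_eq l pos _ hl]
            exact hA2 (by omega) (2*pos+2) (by omega) hcl (by omega)
          · by_cases hpj : (j-1)/2 = pos
            · rw [hpj, getD_set_eq l pos _ hl, getD_set_ne l pos j _ (by omega)]
              exact hmin j hj0 hjl hpj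
            · rw [getD_set_ne l pos ((j-1)/2) _ (by omega), getD_set_ne l pos j _ (by omega)]
              exact hSA j hj0 hjl hks hjp hpj
        · intro hsc j hj0 hjl hpj
          simp only [List.length_set] at hjl
          have hpc : (2*pos+2-1)/2 = pos := by omega
          rw [hpc, getD_set_eq l pos _ hl, getD_set_ne l pos j _ (by omega)]
          have := hSA j hj0 hjl (by have := insub_ge hins; omega) (by omega) (by omega)
          rwa [hpj] at this
      · next hc =>
        -- descend to the left child c = 2*pos+1
        have hmin : ∀ j, 0 < j → j < l.length → (j-1)/2 = pos →
            l.getD (2*pos+1) 0 ≤ l.getD j 0 := by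
          intro j hj0 hjl hpj
          have hj : j = 2*pos+1 ∨ j = 2*pos+2 := by omega
          rcases hj with h | h
          · rw [h]
          · have hlen2 : 2*pos+2 < l.length := by omega
            have h2 : l.getD (2*pos+1) 0 < l.getD (2*pos+2) 0 := by
              by_contra hno
              exact hc ⟨hlen2, hno⟩
            rw [h]; omega
        refine ih (2*pos+1) _ (by simp; omega) (by simp; omega)
          (insub_child hins (by omega) (by have := insub_ge hins; omega)) ?_ ?_
        · intro j hj0 hjl hks hjc hpjc
          simp only [List.length_set] at hjl
          by_cases hjp : j = pos
          · rw [hjp] at hks ⊢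
            rw [getD_set_ne l pos ((pos-1)/2) _ (by omega), getD_set_eq l pos _ hl]
            exact hA2 (by omega) (2*pos+1) (by omega) hch (by omega)
          · by_cases hpj : (j-1)/2 = pos
            · rw [hpj, getD_set_eq l pos _ hl, getD_set_ne l pos j _ (by omega)]
              exact hmin j hj0 hjl hpj
            · rw [getD_set_ne l pos ((j-1)/2) _ (by omega), getD_set_ne l pos j _ (by omega)]
              exact hSA j hj0 hjl hks hjp hpj
        · intro hsc j hj0 hjl hpj
          simp only [List.length_set] at hjl
          have hpc : (2*pos+1-1)/2 = pos := by omega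
          rw [hpc, getD_set_eq l pos _ hl, getD_set_ne l pos j _ (by omega)]
          have := hSA j hj0 hjl (by have := insub_ge hins; omega) (by omega) (by omega)
          rwa [hpj] at this
    · next hch =>
      -- pos is a leaf: place newitem and bubble it up
      refine sd_heapfrom newitem s pos pos l (le_refl _) hl hins hSA ?_
      intro j hj0 hjl hpj
      exact absurd hjl (by omega)

theorem siftup_heapfrom (l : List Int) (pos : Nat) (h : pos < l.length)
    (hh : HeapFrom l (pos + 1)) : HeapFrom (hqSiftup l pos) pos := by
  refine su_heapfrom _ pos l.length pos l (by omega) h ?_ ?_ ?_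
  · rw [InSub]; simp
  · intro j hj0 hjl hs hne hpne
    exact hh j hj0 hjl (by omega)
  · intro hc; omega

theorem getD_mem (l : List Int) (j : Nat) (h : j < l.length) : l.getD j 0 ∈ l := by
  rw [List.getD_eq_getElem l 0 h]
  exact List.getElem_mem h

theorem heapify_fold : ∀ (k : Nat) (a : List Int), k ≤ a.length / 2 → HeapFrom a k →
    (((List.range k).reverse.foldl (fun b i => hqSiftup b i) a)).Perm a ∧
    HeapFrom ((List.range k).reverse.foldl (fun b i => hqSiftup b i) a) 0 := by
  intro k
  induction k with
  | zero => intro a _ h0; exact ⟨List.Perm.refl _, h0⟩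
  | succ k ih =>
    intro a hk h0
    have hkl : k < a.length := by omega
    have hb1 : (hqSiftup a k).Perm a := siftup_perm a k hkl
    have hb2 : HeapFrom (hqSiftup a k) k := siftup_heapfrom a k hkl h0
    have hlen : (hqSiftup a k).length = a.length := hb1.length_eq
    rw [List.range_succ, List.reverse_append]
    simp only [List.reverse_singleton, List.singleton_append, List.foldl_cons]
    have hres := ih (hqSiftup a k) (by omega) hb2
    exact ⟨hres.1.trans hb1, hres.2⟩

theorem heapify_perm_heap (l : List Int) :
    (hqHeapify l).Perm l ∧ IsHeap (hqHeapify l) := by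
  refine heapify_fold (l.length / 2) l (le_refl _) ?_
  intro j hj0 hjl hks
  omega

theorem root_le (l : List Int) (h : IsHeap l) : ∀ j, j < l.length → l.getD 0 0 ≤ l.getD j 0 := by
  intro j
  induction j using Nat.strong_induction_on with
  | _ j ih =>
    intro hj
    cases Nat.eq_zero_or_pos j with
    | inl h0 => subst h0; exact le_refl _
    | inr h0 =>
      have hp := h j h0 hj (Nat.zero_le _)
      exact le_trans (ih ((j-1)/2) (by omega) (by omega)) hp

theorem heappop_spec (l : List Int) (h : IsHeap l) (hl : 1 ≤ l.length) :
    (hqHeappop l).1 = l.getD 0 0 ∧ IsHeap (hqHeappop l).2 ∧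
    ((hqHeappop l).1 :: (hqHeappop l).2).Perm l := by
  unfold hqHeappop
  by_cases he : l.dropLast.isEmpty
  · have h1 : l.length = 1 := by
      have := List.isEmpty_iff.mp he
      have := congrArg List.length this
      simp at this; omega
    obtain ⟨x, rfl⟩ := List.length_eq_one_iff.mp h1
    refine ⟨by simp, fun j hj0 hjl => ?_, by simp⟩
    simp [he] at hjl
  · have hne : l.dropLast ≠ [] := fun h' => he (by simp [h'])
    have hlen2 : 2 ≤ l.length := by
      rcases l with _ | ⟨a, t⟩
      · simp at he
      · have := List.length_pos_iff.mpr hne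
        simp at this ⊢
        omega
    have hb1 : HeapFrom ((l.dropLast).set 0 (l.getLastD 0)) 1 := by
      intro j hj0 hjl hks
      simp only [List.length_set, List.length_dropLast] at hjl
      rw [getD_set_ne _ 0 ((j-1)/2) _ (by omega), getD_set_ne _ 0 j _ (by omega),
        getD_dropLast l _ (by omega), getD_dropLast l j (by omega)]
      exact h j hj0 (by omega) (by omega)
    have hblen : 0 < ((l.dropLast).set 0 (l.getLastD 0)).length := by
      simp; omega
    refine ⟨?_, ?_, ?_⟩
    · simp only [he, Bool.false_eq_true, reduceIte]
      exact getD_dropLast l 0 (by omega)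
    · simp only [he, if_neg, Bool.false_eq_true, reduceIte]
      exact siftup_heapfrom _ 0 hblen hb1
    · simp only [he, Bool.false_eq_true, reduceIte]
      obtain ⟨r0, rt, hrest⟩ := List.exists_cons_of_ne_nil hne
      have hsp : (hqSiftup ((l.dropLast).set 0 (l.getLastD 0)) 0).Perm
          ((l.dropLast).set 0 (l.getLastD 0)) := siftup_perm _ 0 hblen
      have hl' : l = (r0 :: rt) ++ [l.getLastD 0] := by
        rw [← hrest]
        have hln : l ≠ [] := by rintro rfl; simp at hne
        rw [List.getLastD_eq_getLast?, List.getLast?_eq_getLast hln]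
        exact (List.dropLast_append_getLast hln).symm
      have hget0 : l.dropLast.getD 0 0 = r0 := by rw [hrest]; rfl
      rw [hget0, hrest]
      rw [hrest] at hsp
      have h1 : ((r0 :: rt).set 0 (l.getLastD 0)) = l.getLastD 0 :: rt := by simp
      rw [h1] at hsp
      have h3 : (r0 :: l.getLastD 0 :: rt).Perm l := by
        conv_rhs => rw [hl']
        exact ((List.perm_append_singleton _ rt).symm).cons r0
      exact (hsp.cons r0).trans h3

theorem heappush_spec (l : List Int) (x : Int) (h : IsHeap l) :
    IsHeap (hqHeappush l x) ∧ (hqHeappush l x).Perm (x :: l) := by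
  unfold hqHeappush
  constructor
  · refine sd_heapfrom x 0 l.length l.length (l ++ [x]) (le_refl _) (by simp) (insub_zero _) ?_ ?_
    · intro j hj0 hjl hks hne hpne
      simp only [List.length_append, List.length_cons, List.length_nil] at hjl
      have hjlt : j < l.length := by omega
      rw [getD_append_left l [x] ((j-1)/2) (by omega), getD_append_left l [x] j hjlt]
      exact h j hj0 hjlt (by omega)
    · intro j hj0 hjl hpj
      simp only [List.length_append, List.length_cons, List.length_nil] at hjl
      omega
  · have hp := sdLoop_perm x 0 l.length l.length (l ++ [x]) (by simp)
    have hself : (l ++ [x]).set l.length x = l ++ [x] := by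
      induction l with
      | nil => rfl
      | cons a t iht => simpa using iht
    rw [hself] at hp
    exact hp.trans (List.perm_append_singleton x l)

-- min(pot) of any rearrangement of a heap is the heap's root
theorem min?_eq_root (hq pot : List Int) (h : IsHeap hq) (hp : pot.Perm hq)
    (hl : 0 < hq.length) : PySem.List.min? pot (fun x => x) = some (hq.getD 0 0) := by
  have hroot_mem : hq.getD 0 0 ∈ pot := hp.mem_iff.mpr (getD_mem hq 0 hl)
  have hroot_le : ∀ y ∈ pot, hq.getD 0 0 ≤ y := by
    intro y hy
    obtain ⟨j, hj, rfl⟩ := List.mem_iff_getElem.mp (hp.mem_iff.mp hy)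
    rw [← List.getD_eq_getElem hq 0 hj]
    exact root_le hq h j hj
  cases hm : PySem.List.min? pot (fun x => x) with
  | none =>
    rw [PySem.List.min?_eq_none_iff] at hm
    subst hm
    simp at hroot_mem
  | some m =>
    have hm1 : m ∈ pot := PySem.List.min?_mem hm
    have hm2 : m ≤ hq.getD 0 0 := PySem.List.min?_isMin hm _ hroot_mem
    have hm3 : hq.getD 0 0 ≤ m := hroot_le m hm1
    rw [le_antisymm hm2 hm3]

theorem loop_eq (K : Int) : ∀ (n fa fb : Nat) (hq pot : List Int) (answer : Int),
    hq.length = n → 1 ≤ n → n ≤ fa → n ≤ fb → IsHeap hq → pot.Perm hq →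
    altLoop fb K pot answer = hqLoop fa K hq answer := by
  intro n
  induction n using Nat.strong_induction_on with
  | _ n ih =>
    intro fa fb hq pot answer hlen hn1 hfa hfb hheap hperm
    have hplen : pot.length = n := by rw [hperm.length_eq, hlen]
    have hmin1 := min?_eq_root hq pot hheap hperm (by omega)
    obtain ⟨fa', rfl⟩ : ∃ fa', fa = fa' + 1 := ⟨fa - 1, by omega⟩
    obtain ⟨fb', rfl⟩ : ∃ fb', fb = fb' + 1 := ⟨fb - 1, by omega⟩
    rw [altLoop, hqLoop]
    by_cases hK : hq.getD 0 0 < K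
    · rw [if_pos hK]
      split
      · next hm => rw [hmin1] at hm; cases hm
      · next a hm =>
        rw [hmin1] at hm
        have ha : a = hq.getD 0 0 := (Option.some.inj hm).symm
        subst ha
        rw [if_pos hK]
        by_cases hsmall : n < 2
        · rw [if_pos (by omega : pot.length < 2), if_pos (by omega : hq.length < 2)]
        · rw [if_neg (by omega : ¬ pot.length < 2), if_neg (by omega : ¬ hq.length < 2)]
          -- first pop
          obtain ⟨hpop1a, hpop1h, hpop1p⟩ := heappop_spec hq hheap (by omega)
          have hlen1 : (hqHeappop hq).2.length + 1 = n := by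
            rw [← hlen]; exact hqHeappop_length hq (by omega)
          have hmem1 : hq.getD 0 0 ∈ pot := hperm.mem_iff.mpr (getD_mem hq 0 (by omega))
          have hperm1 : (pot.erase (hq.getD 0 0)).Perm (hqHeappop hq).2 := by
            have h1 : pot.Perm ((hqHeappop hq).1 :: (hqHeappop hq).2) :=
              hperm.trans hpop1p.symm
            rw [hpop1a] at h1
            have := h1.erase (hq.getD 0 0)
            rwa [List.erase_cons_head] at this
          split
          · next h2 =>
            rw [PySem.List.remove?_eq_none_iff] at h2
            exact absurd hmem1 h2
          · next pot1 h2 =>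
            have hpot1 : pot1 = pot.erase (hq.getD 0 0) := by
              rw [PySem.List.remove?_eq_some_erase pot _ hmem1] at h2
              exact (Option.some.inj h2).symm
            subst hpot1
            -- second pop
            have hmin2 := min?_eq_root (hqHeappop hq).2 _ hpop1h hperm1 (by omega)
            obtain ⟨hpop2a, hpop2h, hpop2p⟩ := heappop_spec (hqHeappop hq).2 hpop1h (by omega)
            have hlen2 : (hqHeappop (hqHeappop hq).2).2.length + 2 = n := by
              have := hqHeappop_length (hqHeappop hq).2 (by omega)
              omega
            have hmem2 : (hqHeappop hq).2.getD 0 0 ∈ pot.erase (hq.getD 0 0) :=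
              hperm1.mem_iff.mpr (getD_mem _ 0 (by omega))
            have hperm2 : ((pot.erase (hq.getD 0 0)).erase ((hqHeappop hq).2.getD 0 0)).Perm
                (hqHeappop (hqHeappop hq).2).2 := by
              have h1 : (pot.erase (hq.getD 0 0)).Perm
                  ((hqHeappop (hqHeappop hq).2).1 :: (hqHeappop (hqHeappop hq).2).2) :=
                hperm1.trans hpop2p.symm
              rw [hpop2a] at h1
              have := h1.erase ((hqHeappop hq).2.getD 0 0)
              rwa [List.erase_cons_head] at this
            split
            · next hm2 => rw [hmin2] at hm2; cases hm2
            · next b hm2 =>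
              rw [hmin2] at hm2
              have hb : b = (hqHeappop hq).2.getD 0 0 := (Option.some.inj hm2).symm
              subst hb
              split
              · next h3 =>
                rw [PySem.List.remove?_eq_none_iff] at h3
                exact absurd hmem2 h3
              · next pot2 h3 =>
                have hpot2 : pot2 = (pot.erase (hq.getD 0 0)).erase
                    ((hqHeappop hq).2.getD 0 0) := by
                  rw [PySem.List.remove?_eq_some_erase _ _ hmem2] at h3
                  exact (Option.some.inj h3).symm
                subst hpot2
                -- push and recurse
                obtain ⟨hpushh, hpushp⟩ := heappush_spec (hqHeappop (hqHeappop hq).2).2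
                  ((hqHeappop hq).1 + (hqHeappop (hqHeappop hq).2).1 * 2) hpop2h
                have hval : hq.getD 0 0 + 2 * (hqHeappop hq).2.getD 0 0 =
                    (hqHeappop hq).1 + (hqHeappop (hqHeappop hq).2).1 * 2 := by
                  rw [hpop1a, hpop2a]; ring
                refine ih (n - 1) (by omega) fa' fb' _ _ (answer + 1) ?_ (by omega)
                  (by omega) (by omega) hpushh ?_
                · rw [hqHeappush_length]; omega
                · rw [hval]
                  refine (List.perm_append_singleton _ _).trans ?_
                  exact (List.Perm.cons _ hperm2).trans hpushp.symm
    · rw [if_neg hK]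
      split
      · rfl
      · next a hm =>
        rw [hmin1] at hm
        have ha : a = hq.getD 0 0 := (Option.some.inj hm).symm
        subst ha
        rw [if_neg hK]

-- ===== VERDICT (by name: the statement is the Claim_ definition above) =====
theorem solution_spec : Claim_equal_solution := by
  intro scoville K _hdom hpre
  unfold Spec_solution solution solution_alt
  obtain ⟨hperm, hheap⟩ := heapify_perm_heap scoville
  have hlen : 1 ≤ (hqHeapify scoville).length := by
    rcases List.exists_cons_of_ne_nil hpre with ⟨a, t, rfl⟩
    have := hperm.length_eq; simp at this; omega
  exact (loop_eq K (hqHeapify scoville).length (hqHeapify scoville).length scoville.length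
    (hqHeapify scoville) scoville 0 rfl hlen (le_refl _) (by rw [hperm.length_eq]) hheap
    hperm.symm).symm
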